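-- pv_equiv track=rewrite | github.com/frikimatii/actualizacion_fadecoStock | funciones.py | preguntar_por_afiladores
-- ===== SOURCE A (Python) =====
-- def preguntar_por_afiladores(cantidad_deseada, piezas_disponibles):
--     piezas_necesarias = {
--         "capuchon_afilador": 2,
--         "carcaza_afilador": 1,
--         "eje_corto": 1,
--         "eje_largo": 1,
--         "ruleman608": 2,
--         "palanca_afilador": 1,
--         "resorte_palanca": 1,
--         "resorte_empuje": 2
--     }
--
--     piezas_faltantes = {}
--
--     for pieza, cantidad_necesaria in piezas_necesarias.items():
--         cantidad_disponible = piezas_disponibles.get(pieza, 0)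
--         if cantidad_disponible < cantidad_deseada * cantidad_necesaria:
--             cantidad_faltante = cantidad_deseada * cantidad_necesaria - cantidad_disponible
--             piezas_faltantes[pieza] = cantidad_faltante
--
--     cantidad_posible = min(piezas_disponibles.get(pieza, 0) // cantidad_necesaria for pieza, cantidad_necesaria in piezas_necesarias.items())
--
--     return cantidad_posible, piezas_faltantes
-- ===== SOURCE B (Python) =====
-- def preguntar_por_afiladores(cantidad_deseada, piezas_disponibles):
--     piezas_necesarias = [
--         ("capuchon_afilador", 2),
--         ("carcaza_afilador", 1),
--         ("eje_corto", 1),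
--         ("eje_largo", 1),
--         ("ruleman608", 2),
--         ("palanca_afilador", 1),
--         ("resorte_palanca", 1),
--         ("resorte_empuje", 2),
--     ]
--
--     def resolver(pendientes):
--         (pieza, necesaria), resto = pendientes[0], pendientes[1:]
--         disponible = piezas_disponibles.get(pieza, 0)
--         posible = disponible // necesaria
--         if disponible < cantidad_deseada * necesaria:
--             faltan = [(pieza, cantidad_deseada * necesaria - disponible)]
--         else:
--             faltan = []
--         if not resto:
--             return posible, faltan
--         posible_resto, faltan_resto = resolver(resto)
--         return min(posible, posible_resto), faltan + faltan_resto
--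
--     posible, faltantes = resolver(piezas_necesarias)
--     return posible, dict(faltantes)
-- ===== Notes on version B (the rewrite author's own statement) =====
-- stated objective: alternative
-- what changed: B replaces A's two iterative passes over the requirements dict (a conditional-insert loop building the shortage dict, then a min() over a generator) by a single recursive function over the requirements list that returns (buildable count, shortage pairs) for each suffix, combining the head's floor-divided availability with the tail's result via min and list concatenation.
import Mathlib
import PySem

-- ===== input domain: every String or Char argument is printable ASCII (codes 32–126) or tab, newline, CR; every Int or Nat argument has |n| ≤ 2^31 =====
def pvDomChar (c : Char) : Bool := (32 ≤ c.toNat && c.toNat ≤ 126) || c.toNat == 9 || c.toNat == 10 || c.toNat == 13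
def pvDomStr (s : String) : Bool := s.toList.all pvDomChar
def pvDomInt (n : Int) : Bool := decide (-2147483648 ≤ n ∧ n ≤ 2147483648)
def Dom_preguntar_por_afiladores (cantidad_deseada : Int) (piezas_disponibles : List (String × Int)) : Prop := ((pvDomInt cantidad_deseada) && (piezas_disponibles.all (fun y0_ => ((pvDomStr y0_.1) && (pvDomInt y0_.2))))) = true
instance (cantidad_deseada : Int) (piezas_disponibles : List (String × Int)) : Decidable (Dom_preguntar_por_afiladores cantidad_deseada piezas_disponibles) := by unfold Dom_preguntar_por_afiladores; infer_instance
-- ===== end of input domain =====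

-- B replaces A's two iterative passes (conditional-insert loop + min() pass) by one
-- structural recursion over the requirements list (objective: alternative, same exact result).

-- the constant piezas_necesarias table (same literal pairs in both Pythons)
def pvReqs : List (String × Int) :=
  [("capuchon_afilador", 2), ("carcaza_afilador", 1), ("eje_corto", 1), ("eje_largo", 1),
   ("ruleman608", 2), ("palanca_afilador", 1), ("resorte_palanca", 1), ("resorte_empuje", 2)]

-- ===== PORT A =====
-- piezas_disponibles.get(pieza, 0) : dict lookup with default
def preguntar_por_afiladores (cantidad_deseada : Int) (piezas_disponibles : List (String × Int)) : Int × (List (String × Int)) :=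
  let faltantes : PySem.Dict String Int :=
    pvReqs.foldl (fun d r =>
      if (PySem.Dict.mk piezas_disponibles).getD r.1 0 < cantidad_deseada * r.2 then
        d.insert r.1 (cantidad_deseada * r.2 - (PySem.Dict.mk piezas_disponibles).getD r.1 0)
      else d) PySem.Dict.empty
  -- min(generator); pvReqs is a nonempty literal, so min? is always some and .getD 0 is never used
  let posible : Int :=
    (PySem.List.min? (pvReqs.map (fun r => PySem.Int.floordiv ((PySem.Dict.mk piezas_disponibles).getD r.1 0) r.2)) (fun x => x)).getD 0
  (posible, faltantes.items)

-- ===== PORT B =====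
-- B's inner 'resolver': recursion over the remaining requirements; the [] case is
-- unreachable in Source B (resolver is only ever called on nonempty lists)
def pvResolver (cantidad_deseada : Int) (piezas_disponibles : List (String × Int)) : List (String × Int) → Int × (List (String × Int))
  | [] => (0, [])
  | r :: resto =>
    let disponible := (PySem.Dict.mk piezas_disponibles).getD r.1 0
    let posible := PySem.Int.floordiv disponible r.2
    let faltan : List (String × Int) :=
      if disponible < cantidad_deseada * r.2 then [(r.1, cantidad_deseada * r.2 - disponible)] else []
    match resto with
    | [] => (posible, faltan)
    | _ :: _ =>
      let pr := pvResolver cantidad_deseada piezas_disponibles resto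
      (min posible pr.1, faltan ++ pr.2)

def preguntar_por_afiladores_alt (cantidad_deseada : Int) (piezas_disponibles : List (String × Int)) : Int × (List (String × Int)) :=
  let res := pvResolver cantidad_deseada piezas_disponibles pvReqs
  (res.1, (PySem.Dict.ofList res.2).items)   -- dict(faltantes): keys are distinct, insertion order kept

-- ===== PRECONDITION & SPEC =====
def Spec_preguntar_por_afiladores (cantidad_deseada : Int) (piezas_disponibles : List (String × Int)) (out : Int × (List (String × Int))) : Prop := out = preguntar_por_afiladores_alt cantidad_deseada piezas_disponibles
instance (cantidad_deseada : Int) (piezas_disponibles : List (String × Int)) (out : Int × (List (String × Int))) : Decidable (Spec_preguntar_por_afiladores cantidad_deseada piezas_disponibles out) := by unfold Spec_preguntar_por_afiladores; infer_instance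

-- ===== CLAIM (what is proved, stated in full; the proofs are below) =====
def Claim_equal_preguntar_por_afiladores : Prop := ∀ (cantidad_deseada : Int) (piezas_disponibles : List (String × Int)), Dom_preguntar_por_afiladores cantidad_deseada piezas_disponibles → Spec_preguntar_por_afiladores cantidad_deseada piezas_disponibles (preguntar_por_afiladores cantidad_deseada piezas_disponibles)

-- ===== LEMMAS AND PROOFS =====

-- the per-requirement quantities both programs compute
def pvQ (pd : List (String × Int)) (r : String × Int) : Int :=
  PySem.Int.floordiv ((PySem.Dict.mk pd).getD r.1 0) r.2
def pvP (cd : Int) (pd : List (String × Int)) (r : String × Int) : Bool :=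
  decide ((PySem.Dict.mk pd).getD r.1 0 < cd * r.2)
def pvF (cd : Int) (pd : List (String × Int)) (r : String × Int) : String × Int :=
  (r.1, cd * r.2 - (PySem.Dict.mk pd).getD r.1 0)

-- B's recursion computes, on a nonempty list, the running-minimum fold of the quotients
theorem pvResolver_fst (cd : Int) (pd : List (String × Int)) :
    ∀ (rs : List (String × Int)) (r : String × Int),
      (pvResolver cd pd (r :: rs)).1 = (rs.map (pvQ pd)).foldl min (pvQ pd r) := by
  intro rs
  induction rs with
  | nil => intro r; rfl
  | cons a t ih =>
      intro r
      show min (pvQ pd r) (pvResolver cd pd (a :: t)).1 = _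
      rw [ih a]
      simp only [List.map, List.foldl]
      exact (List.foldl_assoc).symm

-- B's recursion collects exactly the short requirements, in order
theorem pvResolver_snd (cd : Int) (pd : List (String × Int)) :
    ∀ (rs : List (String × Int)),
      (pvResolver cd pd rs).2 = (rs.filter (pvP cd pd)).map (pvF cd pd) := by
  intro rs
  induction rs with
  | nil => rfl
  | cons r resto ih =>
      cases resto with
      | nil =>
          by_cases h : (PySem.Dict.mk pd).getD r.1 0 < cd * r.2 <;>
            simp [pvResolver, pvP, pvF, h]
      | cons a t =>
          show (if (PySem.Dict.mk pd).getD r.1 0 < cd * r.2 then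
                  [(r.1, cd * r.2 - (PySem.Dict.mk pd).getD r.1 0)] else []) ++
                 (pvResolver cd pd (a :: t)).2 = _
          rw [ih]
          by_cases h : (PySem.Dict.mk pd).getD r.1 0 < cd * r.2 <;>
            simp [pvP, pvF, h]

-- A's conditional-insert loop over fresh distinct keys yields the filtered, mapped items
theorem pvItems_foldl_insert_if (cd : Int) (pd : List (String × Int)) :
    ∀ (rs : List (String × Int)) (d : PySem.Dict String Int),
      (∀ a ∈ rs, d.contains a.1 = false) → (rs.map Prod.fst).Nodup →
      (rs.foldl (fun d r =>
          if (PySem.Dict.mk pd).getD r.1 0 < cd * r.2 then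
            d.insert r.1 (cd * r.2 - (PySem.Dict.mk pd).getD r.1 0)
          else d) d).items
        = d.items ++ (rs.filter (pvP cd pd)).map (pvF cd pd) := by
  intro rs
  induction rs with
  | nil => intro d _ _; simp
  | cons a t ih =>
      intro d hfresh hnd
      simp only [List.foldl]
      by_cases hc : (PySem.Dict.mk pd).getD a.1 0 < cd * a.2
      · simp only [if_pos hc]
        have hna : d.contains a.1 = false := hfresh a (List.mem_cons_self ..)
        have hfresh' : ∀ b ∈ t, (d.insert a.1 (cd * a.2 - (PySem.Dict.mk pd).getD a.1 0)).contains b.1 = false := by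
          intro b hb
          rw [PySem.Dict.contains_insert]
          have hne : b.1 ≠ a.1 := by
            simp only [List.map, List.nodup_cons, List.mem_map] at hnd
            exact fun h => hnd.1 ⟨b, hb, h⟩
          simp [hne, hfresh b (List.mem_cons_of_mem _ hb)]
        rw [ih _ hfresh' (by simp only [List.map, List.nodup_cons] at hnd; exact hnd.2),
            PySem.Dict.items_insert, hna]
        simp [pvP, pvF, hc]
      · simp only [if_neg hc]
        rw [ih d (fun b hb => hfresh b (List.mem_cons_of_mem _ hb))
              (by simp only [List.map, List.nodup_cons] at hnd; exact hnd.2)]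
        simp [pvP, hc]

-- dict(faltantes) keeps B's shortage list as it is: its keys are distinct
theorem pvOfList_items (cd : Int) (pd : List (String × Int)) :
    (PySem.Dict.ofList ((pvReqs.filter (pvP cd pd)).map (pvF cd pd))).items
      = (pvReqs.filter (pvP cd pd)).map (pvF cd pd) := by
  have hkeys : (((pvReqs.filter (pvP cd pd)).map (pvF cd pd)).map Prod.fst).Nodup := by
    have : ((pvReqs.filter (pvP cd pd)).map (pvF cd pd)).map Prod.fst
        = (pvReqs.filter (pvP cd pd)).map Prod.fst := by
      simp [List.map_map, Function.comp, pvF]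
    rw [this]
    exact (List.filter_sublist.map Prod.fst).nodup (by decide)
  show (((pvReqs.filter (pvP cd pd)).map (pvF cd pd)).foldl
          (fun d p => d.insert p.1 p.2) PySem.Dict.empty).items = _
  rw [PySem.Dict.items_foldl_insert_fresh _ _ _ _
        (fun a _ => PySem.Dict.contains_empty _) hkeys]
  simp only [List.map_map, Function.comp_def]
  rfl

-- ===== VERDICT (by name: the statement is the Claim_ definition above) =====
theorem preguntar_por_afiladores_spec : Claim_equal_preguntar_por_afiladores := by
  intro cd pd _
  unfold Spec_preguntar_por_afiladores
  simp only [preguntar_por_afiladores, preguntar_por_afiladores_alt]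
  refine Prod.ext ?_ ?_
  · show (PySem.List.min? (pvReqs.map fun r =>
        PySem.Int.floordiv ((PySem.Dict.mk pd).getD r.1 0) r.2) (fun x => x)).getD 0
      = (pvResolver cd pd pvReqs).1
    rw [show pvReqs = ("capuchon_afilador", (2 : Int)) ::
          [("carcaza_afilador", 1), ("eje_corto", 1), ("eje_largo", 1), ("ruleman608", 2),
           ("palanca_afilador", 1), ("resorte_palanca", 1), ("resorte_empuje", 2)] from rfl,
        pvResolver_fst cd pd]
    simp only [List.map, PySem.List.min?_id_cons, Option.getD_some, pvQ]
  · show (pvReqs.foldl _ PySem.Dict.empty).items = (PySem.Dict.ofList (pvResolver cd pd pvReqs).2).items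
    rw [pvResolver_snd, pvOfList_items,
        pvItems_foldl_insert_if cd pd pvReqs PySem.Dict.empty
          (fun a _ => PySem.Dict.contains_empty _) (by decide)]
    rfl
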